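-- pv_equiv track=rewrite | github.com/wngncl2336/iata_gp32_cw | clean_data_fix/save_cleaned_data.py | clean_tokens_and_labels
-- ===== SOURCE A (Python) =====
-- def clean_tokens_and_labels(tokens, labels_dict):
--     cleaned_tokens = []
--     cleaned_labels = {k: [] for k in labels_dict.keys()}
--
--     for i, token in enumerate(tokens):
--         clean_token = token.replace('[', '').replace(']', '').strip()
--
--         if not clean_token:
--             continue
--
--         cleaned_tokens.append(clean_token)
--
--         for element in labels_dict:
--             cleaned_labels[element].append(labels_dict[element][i])
--
--     return cleaned_tokens, cleaned_labels
-- ===== SOURCE B (Python) =====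
-- def clean_tokens_and_labels(tokens, labels_dict):
--     # Row-major approach: transpose the label columns into per-index rows,
--     # walk token/row pairs once, then transpose the surviving rows back.
--     keys = list(labels_dict)
--     rows = list(zip(*labels_dict.values())) if keys else [()] * len(tokens)
--     pairs = []
--     for token, row in zip(tokens, rows):
--         clean = token.replace('[', '').replace(']', '').strip()
--         if clean:
--             pairs.append((clean, row))
--     cleaned_tokens = [c for c, _ in pairs]
--     cols = list(zip(*(r for _, r in pairs))) or [()] * len(keys)
--     cleaned_labels = {k: list(col) for k, col in zip(keys, cols)}
--     return cleaned_tokens, cleaned_labels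
-- ===== Notes on version B (the rewrite author's own statement) =====
-- stated objective: alternative
-- what changed: B changes the data representation: it transposes the label columns into per-index rows (zip(*values)), walks token/row pairs once keeping the surviving (cleaned token, row) pairs, and transposes the surviving rows back into per-key columns, instead of A's nested loop that appends to each key's list for every kept token.
import Mathlib
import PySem

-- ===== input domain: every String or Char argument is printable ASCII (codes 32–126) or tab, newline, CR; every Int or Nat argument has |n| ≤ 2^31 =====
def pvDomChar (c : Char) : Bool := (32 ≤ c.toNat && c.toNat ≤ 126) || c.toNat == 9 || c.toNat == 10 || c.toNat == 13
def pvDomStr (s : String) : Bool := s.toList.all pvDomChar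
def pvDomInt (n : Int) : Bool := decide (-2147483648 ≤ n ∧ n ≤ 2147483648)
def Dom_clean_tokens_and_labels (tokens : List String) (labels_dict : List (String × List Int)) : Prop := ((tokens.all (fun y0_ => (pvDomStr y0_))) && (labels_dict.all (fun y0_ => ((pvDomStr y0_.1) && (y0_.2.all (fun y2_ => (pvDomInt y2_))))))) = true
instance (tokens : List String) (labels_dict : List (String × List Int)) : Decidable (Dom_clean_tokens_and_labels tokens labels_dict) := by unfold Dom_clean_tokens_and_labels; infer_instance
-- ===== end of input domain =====

-- B transposes the label columns into per-index rows, filters token/row pairs in one pass,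
-- and transposes the survivors back (row-major alternative to A's interleaved nested appends).


-- token.replace('[', '').replace(']', '').strip()  (shared cleaning expression of both Pythons)
def pvClean (t : String) : String :=
  PySem.Str.strip (PySem.Str.replace (PySem.Str.replace t "[" "") "]" "")

-- ===== PORT A =====
-- cleaned_labels[element].append(v): append to the FIRST entry with key k (Python dict key lookup)
def pvAppendFirst (cl : List (String × List Int)) (k : String) (v : Int) : List (String × List Int) :=
  match cl with
  | [] => []
  | p :: rest => if p.1 = k then (p.1, p.2 ++ [v]) :: rest else p :: pvAppendFirst rest k v

-- labels_dict[element]: first-match lookup ([] would be a KeyError; k always comes from labels_dict's own keys)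
def pvLookup (d : List (String × List Int)) (k : String) : List Int :=
  match d with
  | [] => []
  | p :: rest => if p.1 = k then p.2 else pvLookup rest k

def clean_tokens_and_labels (tokens : List String) (labels_dict : List (String × List Int)) : List String × (List (String × List Int)) :=
  -- {k: [] for k in labels_dict.keys()}: a Python dict's keys are distinct, so this is the key list paired with []
  let init : List (String × List Int) := labels_dict.map (fun p => (p.1, ([] : List Int)))
  (PySem.List.enumerate tokens).foldl
    (fun st it =>
      let c := pvClean it.2
      if c = "" then st
      else (st.1 ++ [c],
            labels_dict.foldl
              (fun cl p =>
                -- labels_dict[element][i]: IndexError (excluded by Pre_) ported as getD 0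
                pvAppendFirst cl p.1 ((PySem.List.pyGet? (pvLookup labels_dict p.1) it.1).getD 0))
              st.2))
    ([], init)

-- ===== PORT B =====
-- zip(*lists): first list kept apart so the recursion is structural; truncates at the shortest list
def pvTranspose : List Int → List (List Int) → List (List Int)
  | [], _ => []
  | x :: xs, rest =>
    if rest.any (fun l => l.isEmpty) then []
    else (x :: rest.map (fun l => l.headI)) :: pvTranspose xs (rest.map (fun l => l.tail))

def clean_tokens_and_labels_alt (tokens : List String) (labels_dict : List (String × List Int)) : List String × (List (String × List Int)) :=
  let keys := labels_dict.map Prod.fst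
  -- rows = list(zip(*labels_dict.values())) if keys else [()] * len(tokens)
  let rows : List (List Int) :=
    match labels_dict.map Prod.snd with
    | [] => List.replicate tokens.length []
    | l :: rest => pvTranspose l rest
  -- one pass over zip(tokens, rows) keeping (clean, row) for nonempty clean
  let pairs := (List.zip tokens rows).filterMap (fun p =>
    let c := pvClean p.1
    if c = "" then none else some (c, p.2))
  let cleaned_tokens := pairs.map Prod.fst
  -- cols = list(zip(*(r for _, r in pairs))) or [()] * len(keys)
  let cols :=
    let z : List (List Int) :=
      match pairs.map Prod.snd with
      | [] => []
      | r :: rs => pvTranspose r rs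
    if z.isEmpty then List.replicate keys.length ([] : List Int) else z
  (cleaned_tokens, List.zip keys cols)

-- ===== PRECONDITION & SPEC =====
-- Pre_ excludes the inputs on which Python A raises IndexError (a label list too short for a
-- surviving token's index), and duplicate-key association lists, which cannot arise from a Python dict.
def Pre_clean_tokens_and_labels (tokens : List String) (labels_dict : List (String × List Int)) : Prop :=
  (labels_dict.map Prod.fst).Nodup ∧
  ∀ it ∈ PySem.List.enumerate tokens, pvClean it.2 ≠ "" →
    ∀ p ∈ labels_dict, PySem.Raise.InRange p.2.length it.1
instance (tokens : List String) (labels_dict : List (String × List Int)) : Decidable (Pre_clean_tokens_and_labels tokens labels_dict) := by unfold Pre_clean_tokens_and_labels; infer_instance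

def pvWitness_clean_tokens_and_labels : List String × (List (String × List Int)) :=
  (["a", " ", "[b]"], [("x", [1, 2, 3]), ("y", [4, 5, 6])])

def Spec_clean_tokens_and_labels (tokens : List String) (labels_dict : List (String × List Int)) (out : List String × (List (String × List Int))) : Prop := out = clean_tokens_and_labels_alt tokens labels_dict
instance (tokens : List String) (labels_dict : List (String × List Int)) (out : List String × (List (String × List Int))) : Decidable (Spec_clean_tokens_and_labels tokens labels_dict out) := by unfold Spec_clean_tokens_and_labels; infer_instance

-- ===== CLAIM (what is proved, stated in full; the proofs are below) =====
def Claim_equal_clean_tokens_and_labels : Prop := ∀ (tokens : List String) (labels_dict : List (String × List Int)), Dom_clean_tokens_and_labels tokens labels_dict → Pre_clean_tokens_and_labels tokens labels_dict → Spec_clean_tokens_and_labels tokens labels_dict (clean_tokens_and_labels tokens labels_dict)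

-- ===== LEMMAS AND PROOFS =====

-- ---- A-side characterisation (A's nested fold equals the kept-index form) ----

def pvStep (labels_dict : List (String × List Int)) :
    (List String × List (String × List Int)) → (Int × String) → (List String × List (String × List Int)) :=
  fun st it =>
    let c := pvClean it.2
    if c = "" then st
    else (st.1 ++ [c],
          labels_dict.foldl
            (fun cl p => pvAppendFirst cl p.1 ((PySem.List.pyGet? (pvLookup labels_dict p.1) it.1).getD 0))
            st.2)

def pvKept (l : List (Int × String)) : List (Int × String) :=
  l.filterMap (fun it => let c := pvClean it.2; if c = "" then none else some (it.1, c))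

theorem pvLookup_eq {d : List (String × List Int)} (hnd : (d.map Prod.fst).Nodup)
    {p : String × List Int} (hp : p ∈ d) : pvLookup d p.1 = p.2 := by
  induction d with
  | nil => cases hp
  | cons q rest ih =>
    simp only [List.map_cons, List.nodup_cons] at hnd
    rw [List.mem_cons] at hp
    rcases hp with rfl | hp
    · simp [pvLookup]
    · have hne : ¬ q.1 = p.1 := fun h => hnd.1 (h ▸ List.mem_map_of_mem hp)
      simp [pvLookup, hne, ih hnd.2 hp]

theorem pvAppendFirst_append {A B : List (String × List Int)} {k : String} {v : Int}
    (h : k ∉ A.map Prod.fst) : pvAppendFirst (A ++ B) k v = A ++ pvAppendFirst B k v := by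
  induction A with
  | nil => rfl
  | cons q rest ih =>
    simp only [List.map_cons, List.mem_cons] at h
    rw [not_or] at h
    have hne : ¬ q.1 = k := fun hh => h.1 hh.symm
    simp [pvAppendFirst, hne, ih h.2]

theorem pv_inner (g : (String × List Int) → Int) (f : (String × List Int) → List Int) :
    ∀ (todo done : List (String × List Int)),
    (((done ++ todo).map Prod.fst).Nodup) →
    todo.foldl (fun cl p => pvAppendFirst cl p.1 (g p))
      (done.map (fun q => (q.1, f q ++ [g q])) ++ todo.map (fun q => (q.1, f q)))
    = (done ++ todo).map (fun q => (q.1, f q ++ [g q])) := by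
  intro todo
  induction todo with
  | nil => intro done _; simp
  | cons p rest ih =>
    intro done hnd
    have hmem0 : p.1 ∉ done.map Prod.fst := by
      intro hmem
      rw [List.map_append, List.nodup_append] at hnd
      exact hnd.2.2 p.1 hmem p.1 (by simp) rfl
    have hnotin : p.1 ∉ (done.map (fun q => (q.1, f q ++ [g q]))).map Prod.fst := by
      simpa using hmem0
    have step : pvAppendFirst
        (done.map (fun q => (q.1, f q ++ [g q])) ++ (p.1, f p) :: rest.map (fun q => (q.1, f q)))
        p.1 (g p)
        = (done ++ [p]).map (fun q => (q.1, f q ++ [g q])) ++ rest.map (fun q => (q.1, f q)) := by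
      rw [pvAppendFirst_append hnotin]
      simp [pvAppendFirst]
    have hnd' : (((done ++ [p]) ++ rest).map Prod.fst).Nodup := by
      simpa [List.append_assoc] using hnd
    calc (p :: rest).foldl (fun cl p => pvAppendFirst cl p.1 (g p))
          (done.map (fun q => (q.1, f q ++ [g q])) ++ (p :: rest).map (fun q => (q.1, f q)))
        = rest.foldl (fun cl p => pvAppendFirst cl p.1 (g p))
          ((done ++ [p]).map (fun q => (q.1, f q ++ [g q])) ++ rest.map (fun q => (q.1, f q))) := by
          simp only [List.foldl_cons, List.map_cons]; rw [step]
      _ = ((done ++ [p]) ++ rest).map (fun q => (q.1, f q ++ [g q])) := ih (done ++ [p]) hnd'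
      _ = (done ++ p :: rest).map (fun q => (q.1, f q ++ [g q])) := by
          simp [List.append_assoc]

-- the inner fold of A, on a state with labels_dict's key structure, appends labels_dict[k][i] pointwise
theorem pv_inner_dict (labels_dict : List (String × List Int)) (i : Int)
    (f : (String × List Int) → List Int)
    (hnd : (labels_dict.map Prod.fst).Nodup) :
    labels_dict.foldl
      (fun cl p => pvAppendFirst cl p.1 ((PySem.List.pyGet? (pvLookup labels_dict p.1) i).getD 0))
      (labels_dict.map (fun q => (q.1, f q)))
    = labels_dict.map (fun q => (q.1, f q ++ [(PySem.List.pyGet? q.2 i).getD 0])) := by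
  have h := pv_inner (fun p => (PySem.List.pyGet? (pvLookup labels_dict p.1) i).getD 0) f
    labels_dict [] (by simpa using hnd)
  simp only [List.map_nil, List.nil_append] at h
  rw [h]
  apply List.map_congr_left
  intro q hq
  rw [pvLookup_eq hnd hq]

theorem pv_outer (labels_dict : List (String × List Int))
    (hnd : (labels_dict.map Prod.fst).Nodup) :
    ∀ (l : List (Int × String)) (ct : List String) (f : (String × List Int) → List Int),
    l.foldl (pvStep labels_dict) (ct, labels_dict.map (fun q => (q.1, f q)))
    = (ct ++ (pvKept l).map (fun q => q.2),
       labels_dict.map (fun q => (q.1, f q ++ (pvKept l).map (fun it => (PySem.List.pyGet? q.2 it.1).getD 0)))) := by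
  intro l
  induction l with
  | nil => intro ct f; simp [pvKept]
  | cons it rest ih =>
    intro ct f
    rw [List.foldl_cons]
    by_cases hc : pvClean it.2 = ""
    · have hstep : pvStep labels_dict (ct, labels_dict.map (fun q => (q.1, f q))) it
          = (ct, labels_dict.map (fun q => (q.1, f q))) := by
        simp [pvStep, hc]
      rw [hstep, ih ct f]
      simp [pvKept, hc]
    · have hstep : pvStep labels_dict (ct, labels_dict.map (fun q => (q.1, f q))) it
          = (ct ++ [pvClean it.2],
             labels_dict.map (fun q => (q.1, f q ++ [(PySem.List.pyGet? q.2 it.1).getD 0]))) := by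
        simp only [pvStep, hc]
        rw [pv_inner_dict labels_dict it.1 f hnd]
        simp
      rw [hstep, ih (ct ++ [pvClean it.2]) (fun q => f q ++ [(PySem.List.pyGet? q.2 it.1).getD 0])]
      simp [pvKept, hc, List.append_assoc]

theorem pv_A_form (tokens : List String) (labels_dict : List (String × List Int))
    (hnd : (labels_dict.map Prod.fst).Nodup) :
    clean_tokens_and_labels tokens labels_dict
    = ((pvKept (PySem.List.enumerate tokens)).map (fun q => q.2),
       labels_dict.map (fun q => (q.1,
         (pvKept (PySem.List.enumerate tokens)).map (fun it => (PySem.List.pyGet? q.2 it.1).getD 0)))) := by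
  unfold clean_tokens_and_labels
  have h := pv_outer labels_dict hnd (PySem.List.enumerate tokens) [] (fun _ => [])
  simp only [List.nil_append] at h
  exact h

-- ---- B-side: transpose characterisation ----

-- min of the lengths of l :: rest (the number of rows zip(*) produces)
def pvMins (l : List Int) (rest : List (List Int)) : Nat :=
  rest.foldr (fun xs a => min xs.length a) l.length

theorem pvMins_nil_left (rest : List (List Int)) : pvMins [] rest = 0 := by
  induction rest with
  | nil => rfl
  | cons r rs ih =>
    simp only [pvMins, List.foldr_cons] at ih ⊢
    omega

theorem pvMins_any_empty {l : List Int} {rest : List (List Int)}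
    (h : rest.any (fun l => l.isEmpty) = true) : pvMins l rest = 0 := by
  induction rest with
  | nil => simp at h
  | cons r rs ih =>
    simp only [List.any_cons, Bool.or_eq_true] at h
    rcases h with h | h
    · have h0 : r.length = 0 := by simpa [List.isEmpty_iff_length_eq_zero] using h
      simp only [pvMins, List.foldr_cons]
      omega
    · have := ih h
      simp only [pvMins, List.foldr_cons] at this ⊢
      omega

theorem pvMins_succ {x : Int} {xs : List Int} {rest : List (List Int)}
    (h : rest.any (fun l => l.isEmpty) = false) :
    pvMins (x :: xs) rest = pvMins xs (rest.map (fun l => l.tail)) + 1 := by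
  induction rest with
  | nil => simp [pvMins]
  | cons r rs ih =>
    simp only [List.any_cons, Bool.or_eq_false_iff] at h
    have hr : r.length ≠ 0 := by
      have := h.1
      cases r <;> simp_all
    have htail : r.tail.length = r.length - 1 := by simp
    have := ih h.2
    simp only [pvMins, List.foldr_cons, List.map_cons] at this ⊢
    omega

theorem pv_getD_zero (l : List Int) : l.getD 0 0 = l.headI := by cases l <;> rfl

theorem pv_getD_succ (l : List Int) (i : Nat) : l.getD (i + 1) 0 = l.tail.getD i 0 := by
  cases l <;> rfl

theorem pvTranspose_eq (l : List Int) (rest : List (List Int)) :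
    pvTranspose l rest
    = (List.range (pvMins l rest)).map (fun i => (l :: rest).map (fun xs => xs.getD i 0)) := by
  induction l generalizing rest with
  | nil => simp [pvTranspose, pvMins_nil_left]
  | cons x xs ih =>
    by_cases h : rest.any (fun l => l.isEmpty) = true
    · simp [pvTranspose, h, pvMins_any_empty h]
    · have h' : rest.any (fun l => l.isEmpty) = false := by
        cases hh : rest.any (fun l => l.isEmpty) with
        | true => exact absurd hh h
        | false => rfl
      rw [pvMins_succ h', List.range_succ_eq_map]
      have hzero : ((x :: xs) :: rest).map (fun xs => xs.getD 0 0)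
          = x :: rest.map (fun l => l.headI) := by
        simp only [List.map_cons]
        rw [List.map_congr_left (fun a _ => pv_getD_zero a)]
        rfl
      have hsucc : ∀ i : Nat, ((x :: xs) :: rest).map (fun xs => xs.getD (i + 1) 0)
          = (xs :: rest.map (fun l => l.tail)).map (fun xs => xs.getD i 0) := by
        intro i
        simp only [List.map_cons, List.map_map]
        rw [List.map_congr_left (fun a _ => pv_getD_succ a i)]
        rfl
      simp only [pvTranspose, h', Bool.false_eq_true, if_false]
      rw [List.map_cons, List.map_map]
      refine congrArg₂ List.cons hzero.symm ?_
      rw [ih]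
      apply List.map_congr_left
      intro i _
      simp only [Function.comp_apply]
      exact (hsucc i).symm

theorem lt_pvMins {l : List Int} {rest : List (List Int)} {k : Nat}
    (h1 : k < l.length) (h2 : ∀ xs ∈ rest, k < xs.length) : k < pvMins l rest := by
  induction rest with
  | nil => simpa [pvMins] using h1
  | cons r rs ih =>
    have := ih (fun xs hx => h2 xs (List.mem_cons_of_mem _ hx))
    have hr := h2 r (List.mem_cons_self)
    simp only [pvMins, List.foldr_cons] at this ⊢
    omega

theorem pvMins_const {l : List Int} {rest : List (List Int)} {L : Nat}
    (h1 : l.length = L) (h2 : ∀ xs ∈ rest, xs.length = L) : pvMins l rest = L := by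
  induction rest with
  | nil => simpa [pvMins] using h1
  | cons r rs ih =>
    have := ih (fun xs hx => h2 xs (List.mem_cons_of_mem _ hx))
    have hr := h2 r (List.mem_cons_self)
    simp only [pvMins, List.foldr_cons] at this ⊢
    omega

theorem pvKept_cons_pos (i : Int) (s : String) {l : List (Int × String)}
    (hc : pvClean s = "") : pvKept ((i, s) :: l) = pvKept l := by
  simp [pvKept, hc]

theorem pvKept_cons_neg (i : Int) (s : String) {l : List (Int × String)}
    (hc : ¬ pvClean s = "") : pvKept ((i, s) :: l) = (i, pvClean s) :: pvKept l := by
  simp [pvKept, hc]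

-- ---- B-side: the filtering pass over zip(tokens, rows) in kept-index form ----

theorem pv_pairs (g : Nat → List Int) (m : Nat) :
    ∀ (toks : List String) (j : Nat),
    (∀ it ∈ PySem.List.enumerate toks (j : Int), pvClean it.2 ≠ "" →
        ∃ k : Nat, it.1 = (k : Int) ∧ k < m) →
    (List.zip toks ((List.range' j (m - j)).map g)).filterMap
        (fun p => let c := pvClean p.1; if c = "" then none else some (c, p.2))
    = (pvKept (PySem.List.enumerate toks (j : Int))).map (fun it => (it.2, g it.1.toNat)) := by
  intro toks
  induction toks with
  | nil => intro j _; simp [pvKept, PySem.List.enumerate_nil]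
  | cons t ts ih =>
    intro j hk
    rw [PySem.List.enumerate_cons]
    have hcast : ((j : Int) + 1) = ((j + 1 : Nat) : Int) := by push_cast; ring
    by_cases hj : j < m
    · have hrange : List.range' j (m - j) = j :: List.range' (j + 1) (m - (j + 1)) := by
        have : m - j = (m - (j + 1)) + 1 := by omega
        rw [this, List.range'_succ]
      have htail := ih (j + 1) (by
        intro it hit hc
        exact hk it (by rw [PySem.List.enumerate_cons, hcast]; exact List.mem_cons_of_mem _ hit) hc)
      rw [hrange]
      rw [← hcast] at htail
      by_cases hc : pvClean t = ""
      · rw [pvKept_cons_pos _ _ hc]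
        simpa [hc] using htail
      · rw [pvKept_cons_neg _ _ hc]
        simp [hc, Int.toNat_natCast, htail]
    · have hmj : m - j = 0 := by omega
      rw [hmj]
      simp only [List.range'_zero, List.map_nil, List.zip_nil_right, List.filterMap_nil]
      symm
      rw [List.map_eq_nil_iff]
      unfold pvKept
      rw [List.filterMap_eq_nil_iff]
      intro a ha
      have hge : (j : Int) ≤ a.1 := by
        rcases List.mem_cons.mp ha with rfl | ha'
        · simp
        · rcases (PySem.List.mem_enumerate_iff _ _ _).mp ha' with ⟨k, hklt, hpk⟩
          rw [hpk]; push_cast; omega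
      by_cases hc : pvClean a.2 = ""
      · simp [hc]
      · exfalso
        obtain ⟨k, hk1, hk2⟩ := hk a (by rw [PySem.List.enumerate_cons]; exact ha) hc
        rw [hk1] at hge
        have : j ≤ k := by exact_mod_cast hge
        omega

-- every kept pair's index is a Nat index of tokens whose cleaned token is nonempty
theorem pv_kept_index {tokens : List String} {it : Int × String}
    (h : it ∈ pvKept (PySem.List.enumerate tokens)) :
    ∃ k : Nat, k < tokens.length ∧ it.1 = (k : Int) ∧
      ∃ a ∈ PySem.List.enumerate tokens, a.1 = it.1 ∧ pvClean a.2 ≠ "" := by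
  unfold pvKept at h
  rcases List.mem_filterMap.mp h with ⟨a, ha, hfa⟩
  simp only at hfa
  by_cases hc : pvClean a.2 = ""
  · rw [if_pos hc] at hfa; cases hfa
  · rw [if_neg hc] at hfa
    injection hfa with hfa
    rcases (PySem.List.mem_enumerate_iff _ _ _).mp ha with ⟨k, hklt, hpk⟩
    refine ⟨k, hklt, ?_, a, ha, ?_, hc⟩
    · rw [← hfa]; rw [hpk]; simp
    · rw [← hfa]

theorem pv_zip_replicate (d : List (String × List Int)) :
    List.zip (d.map Prod.fst) (List.replicate d.length ([] : List Int))
    = d.map (fun q => (q.1, ([] : List Int))) := by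
  induction d with
  | nil => rfl
  | cons q qs ih => simpa [List.replicate_succ] using ih

-- ---- B in kept-index form, under Pre_ ----

theorem pv_pairs0 (g : Nat → List Int) (m : Nat) (tokens : List String)
    (hk : ∀ it ∈ PySem.List.enumerate tokens, pvClean it.2 ≠ "" →
        ∃ k : Nat, it.1 = (k : Int) ∧ k < m) :
    (List.zip tokens ((List.range' 0 m).map g)).filterMap
        (fun p => if pvClean p.1 = "" then none else some (pvClean p.1, p.2))
    = (pvKept (PySem.List.enumerate tokens)).map (fun it => (it.2, g it.1.toNat)) := by
  have h := pv_pairs g m tokens 0 (by simpa using hk)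
  simpa using h

theorem pv_zip_cols (d : List (String × List Int)) (K : List (Int × String))
    (hK : ∀ it ∈ K, ∃ k : Nat, it.1 = (k : Int)) :
    List.zip (d.map Prod.fst)
      ((List.range d.length).map (fun i =>
        (K.map (fun it => (d.map Prod.snd).map (fun xs => xs.getD it.1.toNat 0))).map
          (fun xs => xs.getD i 0)))
    = d.map (fun p => (p.1, K.map (fun it => (PySem.List.pyGet? p.2 it.1).getD 0))) := by
  apply List.ext_getElem
  · simp
  · intro i hi1 hi2
    simp only [List.length_zip, List.length_map, List.length_range, Nat.min_self] at hi1
    rw [List.getElem_zip]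
    simp only [List.getElem_map, List.getElem_range]
    refine Prod.ext (by simp) ?_
    simp only [List.map_map]
    apply List.map_congr_left
    intro it hit
    rcases hK it hit with ⟨k, hk⟩
    simp only [Function.comp_apply, hk, Int.toNat_natCast, PySem.List.pyGet?_natCast]
    simp [List.getD_eq_getElem?_getD, List.getElem?_map, List.getElem?_eq_getElem hi1]

theorem pv_B_form (tokens : List String) (labels_dict : List (String × List Int))
    (hpre : ∀ it ∈ PySem.List.enumerate tokens, pvClean it.2 ≠ "" →
      ∀ p ∈ labels_dict, PySem.Raise.InRange p.2.length it.1) :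
    clean_tokens_and_labels_alt tokens labels_dict
    = ((pvKept (PySem.List.enumerate tokens)).map (fun q => q.2),
       labels_dict.map (fun q => (q.1,
         (pvKept (PySem.List.enumerate tokens)).map (fun it => (PySem.List.pyGet? q.2 it.1).getD 0)))) := by
  cases labels_dict with
  | nil =>
    have hk0 : ∀ it ∈ PySem.List.enumerate tokens, pvClean it.2 ≠ "" →
        ∃ k : Nat, it.1 = (k : Int) ∧ k < tokens.length := by
      intro it hit _
      rcases (PySem.List.mem_enumerate_iff _ _ _).mp hit with ⟨k, hklt, hpk⟩
      exact ⟨k, by rw [hpk]; simp, hklt⟩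
    have hrep : List.replicate tokens.length ([] : List Int)
        = (List.range' 0 tokens.length).map (fun _ => ([] : List Int)) := by
      rw [List.map_const']
      simp
    simp only [clean_tokens_and_labels_alt, List.map_nil]
    rw [hrep, pv_pairs0 (fun _ => ([] : List Int)) tokens.length tokens hk0]
    simp [List.map_map, Function.comp_def]
  | cons q qs =>
    -- every kept index is < the number of rows zip(*) produces
    have hk0 : ∀ it ∈ PySem.List.enumerate tokens, pvClean it.2 ≠ "" →
        ∃ k : Nat, it.1 = (k : Int) ∧ k < pvMins q.2 (qs.map Prod.snd) := by
      intro it hit hc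
      rcases (PySem.List.mem_enumerate_iff _ _ _).mp hit with ⟨k, hklt, hpk⟩
      have hit1 : it.1 = (k : Int) := by rw [hpk]; simp
      refine ⟨k, hit1, lt_pvMins ?_ ?_⟩
      · have := hpre it hit hc q List.mem_cons_self
        rw [hit1] at this
        simp only [PySem.Raise.InRange] at this
        omega
      · intro xs hxs
        rcases List.mem_map.mp hxs with ⟨p, hp, rfl⟩
        have := hpre it hit hc p (List.mem_cons_of_mem _ hp)
        rw [hit1] at this
        simp only [PySem.Raise.InRange] at this
        omega
    have hrows : pvTranspose q.2 (qs.map Prod.snd)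
        = (List.range' 0 (pvMins q.2 (qs.map Prod.snd))).map
            (fun i => ((q :: qs).map Prod.snd).map (fun xs => xs.getD i 0)) := by
      rw [pvTranspose_eq, ← List.range_eq_range']
      rfl
    simp only [clean_tokens_and_labels_alt, List.map_cons]
    rw [hrows, pv_pairs0 _ _ tokens hk0]
    -- first components agree
    refine Prod.ext ?_ ?_
    · simp [List.map_map, Function.comp_def]
    · -- second components
      simp only []
      cases hK : pvKept (PySem.List.enumerate tokens) with
      | nil =>
        have h := pv_zip_replicate (q :: qs)
        simpa using h
      | cons k0 Kt =>
        have hmins' : pvMins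
            (q.2.getD k0.1.toNat 0 :: List.map (fun xs => xs.getD k0.1.toNat 0) (List.map Prod.snd qs))
            (List.map Prod.snd
              (List.map (fun it => (it.2,
                q.2.getD it.1.toNat 0 :: List.map (fun xs => xs.getD it.1.toNat 0) (List.map Prod.snd qs))) Kt))
            = qs.length + 1 := by
          apply pvMins_const
          · simp
          · intro xs hxs
            rcases List.mem_map.mp hxs with ⟨p, hp, rfl⟩
            rcases List.mem_map.mp hp with ⟨it, hit, rfl⟩
            simp
        have hKm : ∀ it ∈ k0 :: Kt, ∃ k : Nat, it.1 = (k : Int) := by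
          intro it hit
          rw [← hK] at hit
          rcases pv_kept_index hit with ⟨k, _, h1, _⟩
          exact ⟨k, h1⟩
        simp only [List.map_cons]
        rw [pvTranspose_eq, hmins']
        have hr : (List.range (qs.length + 1)).isEmpty = false := by
          simp [List.range_eq_nil]
        simp only [List.isEmpty_map, hr, Bool.false_eq_true, if_false]
        have h := pv_zip_cols (q :: qs) (k0 :: Kt) hKm
        simpa [Function.comp_def] using h

-- ===== VERDICT (by name: the statement is the Claim_ definition above) =====
theorem clean_tokens_and_labels_spec : Claim_equal_clean_tokens_and_labels := by
  intro tokens labels_dict _ hpre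
  unfold Spec_clean_tokens_and_labels
  rw [pv_A_form tokens labels_dict hpre.1, pv_B_form tokens labels_dict hpre.2]
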